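-- pv_equiv track=rewrite | github.com/awslabs/keys_values | keys_values/kvcache/quantize/bitsandbytes.py | determine_blocksize
-- ===== SOURCE A (Python) =====
-- from typing import Tuple, Optional, Dict
--
-- ALLOWED_BLOCK_SIZE = (64, 128, 256, 512, 1024, 2048, 4096)
--
-- def determine_blocksize(shape: Tuple[int, ...]) -> Optional[Tuple[int, int]]:
--     batch_size, n_query_groups, _, head_size = shape
--     a = batch_size * n_query_groups * head_size
--     blocksize = None
--     for _blocksize in reversed(ALLOWED_BLOCK_SIZE):
--         if a % _blocksize == 0 and a >= _blocksize:
--             blocksize = _blocksize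
--             break
--     if blocksize is None:
--         return None
--     else:
--         return blocksize, a // blocksize
-- ===== SOURCE B (Python) =====
-- def determine_blocksize(shape):
--     batch_size, n_query_groups, _, head_size = shape
--     a = batch_size * n_query_groups * head_size
--     if a < 64:
--         return None
--     # largest allowed (power-of-two) blocksize dividing a is gcd(a, 4096)
--     x, y = a, 4096
--     while y:
--         x, y = y, x % y
--     if x < 64:
--         return None
--     return x, a // x
-- ===== Notes on version B (the rewrite author's own statement) =====
-- stated objective: alternative
-- what changed: Replaces the reversed scan of the ALLOWED_BLOCK_SIZE tuple (first divisor wins) with a Euclid gcd: the largest allowed power-of-two blocksize dividing a is gcd(a, 4096), guarded by a >= 64.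
import Mathlib
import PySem

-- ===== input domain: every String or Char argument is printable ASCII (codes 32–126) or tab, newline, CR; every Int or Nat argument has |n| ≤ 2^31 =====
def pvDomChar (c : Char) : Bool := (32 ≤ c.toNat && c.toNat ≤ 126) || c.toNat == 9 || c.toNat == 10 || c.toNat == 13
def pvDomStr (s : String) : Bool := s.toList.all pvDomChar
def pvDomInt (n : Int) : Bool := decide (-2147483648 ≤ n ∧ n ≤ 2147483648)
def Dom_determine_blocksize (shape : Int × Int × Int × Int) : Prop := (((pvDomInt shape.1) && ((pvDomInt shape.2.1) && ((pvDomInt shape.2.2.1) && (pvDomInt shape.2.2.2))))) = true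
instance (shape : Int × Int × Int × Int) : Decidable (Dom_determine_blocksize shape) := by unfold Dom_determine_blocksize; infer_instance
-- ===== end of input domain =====

-- ===== PORT A =====
-- B replaces the reversed scan of ALLOWED_BLOCK_SIZE with a Euclid gcd against 4096 (alternative decomposition, same cost).
def ALLOWED_BLOCK_SIZE : List Int := [64, 128, 256, 512, 1024, 2048, 4096]

-- 'for _blocksize in reversed(ALLOWED_BLOCK_SIZE): if a % _blocksize == 0 and a >= _blocksize: blocksize = _blocksize; break'
def chooseBS (a : Int) : List Int → Option Int
  | [] => none
  | b :: rest => if PySem.Int.mod a b = 0 ∧ a ≥ b then some b else chooseBS a rest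

def determine_blocksize (shape : Int × Int × Int × Int) : Option (Int × Int) :=
  let batch_size := shape.1
  let n_query_groups := shape.2.1
  let head_size := shape.2.2.2
  let a := batch_size * n_query_groups * head_size
  match chooseBS a ALLOWED_BLOCK_SIZE.reverse with
  | none => none
  | some blocksize => some (blocksize, PySem.Int.floordiv a blocksize)

-- ===== PORT B =====
-- 'x, y = a, 4096; while y: x, y = y, x % y'
def pygcd (x y : Int) : Int :=
  if h : y = 0 then x else pygcd y (PySem.Int.mod x y)
termination_by y.natAbs
decreasing_by
  rcases lt_or_gt_of_ne h with hneg | hpos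
  · have h1 := (PySem.Int.mod_neg_bounds x hneg).1
    have h2 := (PySem.Int.mod_neg_bounds x hneg).2
    omega
  · have h1 := PySem.Int.mod_nonneg x hpos
    have h2 := PySem.Int.mod_lt x hpos
    omega

def determine_blocksize_alt (shape : Int × Int × Int × Int) : Option (Int × Int) :=
  let batch_size := shape.1
  let n_query_groups := shape.2.1
  let head_size := shape.2.2.2
  let a := batch_size * n_query_groups * head_size
  if a < 64 then none
  else
    let x := pygcd a 4096
    if x < 64 then none
    else some (x, PySem.Int.floordiv a x)

-- ===== PRECONDITION & SPEC =====
def Spec_determine_blocksize (shape : Int × Int × Int × Int) (out : Option (Int × Int)) : Prop := out = determine_blocksize_alt shape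
instance (shape : Int × Int × Int × Int) (out : Option (Int × Int)) : Decidable (Spec_determine_blocksize shape out) := by unfold Spec_determine_blocksize; infer_instance

-- ===== CLAIM (what is proved, stated in full; the proofs are below) =====
def Claim_equal_determine_blocksize : Prop := ∀ (shape : Int × Int × Int × Int), Dom_determine_blocksize shape → Spec_determine_blocksize shape (determine_blocksize shape)

-- ===== LEMMAS AND PROOFS =====

theorem gcd_emod_step (x y : Int) (hy : y ≠ 0) : Int.gcd y (x % y) = Int.gcd x y := by
  apply Nat.dvd_antisymm
  · have hx : ((Int.gcd y (x % y) : Nat) : Int) ∣ x := by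
      have hrep : y * (x / y) + x % y = x := Int.ediv_add_emod x y
      have h1 : ((Int.gcd y (x % y) : Nat) : Int) ∣ y := Int.gcd_dvd_left y (x % y)
      have h2 : ((Int.gcd y (x % y) : Nat) : Int) ∣ x % y := Int.gcd_dvd_right y (x % y)
      calc ((Int.gcd y (x % y) : Nat) : Int) ∣ y * (x / y) + x % y := dvd_add (h1.mul_right _) h2
        _ = x := hrep
    have := Int.dvd_coe_gcd hx (Int.gcd_dvd_left y (x % y))
    exact_mod_cast this
  · have h1 : ((Int.gcd x y : Nat) : Int) ∣ x := Int.gcd_dvd_left x y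
    have h2 : ((Int.gcd x y : Nat) : Int) ∣ y := Int.gcd_dvd_right x y
    have h3 : ((Int.gcd x y : Nat) : Int) ∣ x % y := by
      have hrep : x % y = x - y * (x / y) := by rw [Int.emod_def]
      rw [hrep]
      exact dvd_sub h1 (h2.mul_right _)
    exact_mod_cast Int.dvd_coe_gcd h2 h3

theorem pygcd_eq_gcd_aux : ∀ (n : Nat) (x y : Int), y.natAbs ≤ n → 0 ≤ x → 0 ≤ y →
    pygcd x y = ((Int.gcd x y : Nat) : Int) := by
  intro n
  induction n with
  | zero =>
    intro x y hle hx hy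
    have hy0 : y = 0 := by omega
    subst hy0
    rw [pygcd, dif_pos rfl, Int.gcd_zero_right, Int.natAbs_of_nonneg hx]
  | succ n ih =>
    intro x y hle hx hy
    by_cases hy0 : y = 0
    · subst hy0
      rw [pygcd, dif_pos rfl, Int.gcd_zero_right, Int.natAbs_of_nonneg hx]
    · have hypos : 0 < y := lt_of_le_of_ne hy (Ne.symm hy0)
      rw [pygcd, dif_neg hy0, PySem.Int.mod_eq_emod_of_pos hypos]
      have hm1 : 0 ≤ x % y := Int.emod_nonneg x hy0
      have hm2 : x % y < y := Int.emod_lt_of_pos x hypos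
      rw [ih y (x % y) (by omega) hy hm1, gcd_emod_step x y hy0]

theorem pygcd_eq_gcd (x y : Int) (hx : 0 ≤ x) (hy : 0 ≤ y) :
    pygcd x y = ((Int.gcd x y : Nat) : Int) :=
  pygcd_eq_gcd_aux y.natAbs x y le_rfl hx hy

theorem cond_iff (a bsz : Int) (ha : 64 ≤ a) (hpos : 0 < bsz) (hd : bsz ∣ 4096) :
    (PySem.Int.mod a bsz = 0 ∧ a ≥ bsz) ↔ bsz ∣ ((Int.gcd a 4096 : Nat) : Int) := by
  rw [PySem.Int.mod_eq_zero_iff_dvd]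
  constructor
  · rintro ⟨hda, -⟩
    exact Int.dvd_coe_gcd hda hd
  · intro hdg
    have hda : bsz ∣ a := hdg.trans (Int.gcd_dvd_left a 4096)
    exact ⟨hda, Int.le_of_dvd (by omega) hda⟩

theorem chooseBS_small (a : Int) (h : a < 64) : chooseBS a ALLOWED_BLOCK_SIZE.reverse = none := by
  show chooseBS a [4096, 2048, 1024, 512, 256, 128, 64] = none
  simp only [chooseBS]
  rw [if_neg (by rintro ⟨-, h2⟩; omega), if_neg (by rintro ⟨-, h2⟩; omega),
      if_neg (by rintro ⟨-, h2⟩; omega), if_neg (by rintro ⟨-, h2⟩; omega),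
      if_neg (by rintro ⟨-, h2⟩; omega), if_neg (by rintro ⟨-, h2⟩; omega),
      if_neg (by rintro ⟨-, h2⟩; omega)]

theorem main_eq (a : Int) :
    (match chooseBS a ALLOWED_BLOCK_SIZE.reverse with
     | none => (none : Option (Int × Int))
     | some blocksize => some (blocksize, PySem.Int.floordiv a blocksize)) =
    (if a < 64 then none
     else if pygcd a 4096 < 64 then none
     else some (pygcd a 4096, PySem.Int.floordiv a (pygcd a 4096))) := by
  by_cases hlt : a < 64
  · rw [if_pos hlt, chooseBS_small a hlt]
  · push_neg at hlt
    rw [if_neg (by omega)]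
    have hg : pygcd a 4096 = ((Int.gcd a 4096 : Nat) : Int) :=
      pygcd_eq_gcd a 4096 (by omega) (by norm_num)
    have hdr : Int.gcd a 4096 ∣ 2 ^ 12 := by
      have h := Int.gcd_dvd_right a 4096
      have h2 : ((Int.gcd a 4096 : Nat) : Int) ∣ ((4096 : Nat) : Int) := by exact_mod_cast h
      have h3 : Int.gcd a 4096 ∣ 4096 := Int.natCast_dvd_natCast.mp h2
      exact_mod_cast h3
    obtain ⟨j, hj12, hj⟩ := (Nat.dvd_prime_pow Nat.prime_two).mp hdr
    have hrev : ALLOWED_BLOCK_SIZE.reverse = [4096, 2048, 1024, 512, 256, 128, 64] := rfl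
    rw [hrev]
    have c4096 := cond_iff a 4096 hlt (by norm_num) ⟨1, by norm_num⟩
    have c2048 := cond_iff a 2048 hlt (by norm_num) ⟨2, by norm_num⟩
    have c1024 := cond_iff a 1024 hlt (by norm_num) ⟨4, by norm_num⟩
    have c512 := cond_iff a 512 hlt (by norm_num) ⟨8, by norm_num⟩
    have c256 := cond_iff a 256 hlt (by norm_num) ⟨16, by norm_num⟩
    have c128 := cond_iff a 128 hlt (by norm_num) ⟨32, by norm_num⟩
    have c64 := cond_iff a 64 hlt (by norm_num) ⟨64, by norm_num⟩
    simp only [chooseBS, c4096, c2048, c1024, c512, c256, c128, c64]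
    rw [hg, hj]
    interval_cases j <;> norm_num

-- ===== VERDICT (by name: the statement is the Claim_ definition above) =====
theorem determine_blocksize_spec : Claim_equal_determine_blocksize := by
  intro shape _
  exact main_eq (shape.1 * shape.2.1 * shape.2.2.2)
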